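-- pv_equiv track=rewrite | github.com/MoatasimB/LC-solutions | 101000-longest-arithmetic-sequence-after-changing-at-most-one-element/101000. Longest Arithmetic Sequence After Changing At Most One Element.py | longestArithmetic
-- ===== SOURCE A (Python) =====
-- from typing import List
--
-- def longestArithmetic(nums: List[int]) -> int:
--
--     n = len(nums)
--     if n <= 2:
--         return n
--
--     diff = [nums[i + 1] - nums[i] for i in range(n - 1)]
--     m = n - 1
--
--     # L[i] = length of same-diff run ending at i
--     L = [1] * m
--     for i in range(1, m):
--         if diff[i] == diff[i - 1]:
--             L[i] = L[i - 1] + 1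
--
--     # R[i] = length of same-diff run starting at i
--     R = [1] * m
--     for i in range(m - 2, -1, -1):
--         if diff[i] == diff[i + 1]:
--             R[i] = R[i + 1] + 1
--
--     max_run = max(L)
--
--     # No internal bridge: just extend a longest arithmetic block by changing one endpoint
--     ans = min(n, max_run + 2)
--
--     # Try changing each internal element nums[k]
--     for k in range(1, n - 1):
--         gap = nums[k + 1] - nums[k - 1]
--         if gap % 2 != 0:
--             continue
--
--         x = gap // 2
--
--         left = 0
--         if k - 2 >= 0 and diff[k - 2] == x:
--             left = L[k - 2]
--
--         right = 0
--         if k + 1 <= m - 1 and diff[k + 1] == x: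
--             right = R[k + 1]
--
--         ans = max(ans, left + right + 3)
--
--     return min(ans, n)
-- ===== SOURCE B (Python) =====
-- def longestArithmetic(nums):
--     n = len(nums)
--     if n <= 2:
--         return n
--     d = [b - a for a, b in zip(nums, nums[1:])]
--     # longest constant run in d, via a rolling (current, best) pair -- no arrays kept
--     cur = best_run = 1
--     for i in range(1, n - 1):
--         cur = cur + 1 if d[i] == d[i - 1] else 1
--         best_run = max(best_run, cur)
--     best = best_run + 2
--     # changing nums[k] can merge the runs around it: expand locally from k in both
--     # directions while the difference stays x -- no precomputed prefix/suffix arrays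
--     for k in range(1, n - 1):
--         s = d[k - 1] + d[k]
--         if s % 2 == 0:
--             x = s // 2
--             left = 0
--             j = k - 2
--             while j >= 0 and d[j] == x:
--                 left += 1
--                 j -= 1
--             right = 0
--             j = k + 1
--             while j <= n - 2 and d[j] == x:
--                 right += 1
--                 j += 1
--             best = max(best, left + right + 3)
--     return min(best, n)
-- ===== Notes on version B (the rewrite author's own statement) =====
-- stated objective: alternative
-- what changed: Replaces A's precomputed prefix/suffix run arrays (L, R) and max(L) with a rolling run-length maximum and, for each candidate change point, a direct bidirectional expansion scanning outward while the repaired common difference persists.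
import Mathlib
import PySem

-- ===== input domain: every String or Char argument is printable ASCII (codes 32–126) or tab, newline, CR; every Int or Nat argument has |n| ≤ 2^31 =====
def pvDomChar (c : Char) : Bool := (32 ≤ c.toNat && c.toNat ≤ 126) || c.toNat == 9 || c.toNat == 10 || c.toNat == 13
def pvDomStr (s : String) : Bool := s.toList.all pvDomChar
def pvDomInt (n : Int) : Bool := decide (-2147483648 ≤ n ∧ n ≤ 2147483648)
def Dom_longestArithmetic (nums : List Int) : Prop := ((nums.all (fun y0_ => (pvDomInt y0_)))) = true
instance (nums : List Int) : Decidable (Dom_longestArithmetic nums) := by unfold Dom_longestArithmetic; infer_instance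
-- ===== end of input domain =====

-- B replaces A's precomputed prefix/suffix run arrays with local bidirectional expansion
-- around each candidate change point and a rolling run maximum; same return value, similar cost.

-- ===== PORT A =====
def longestArithmetic (nums : List Int) : Int :=
  let n : Int := nums.length
  if n ≤ 2 then n
  else
    let diff : List Int := (PySem.List.pyRange 0 (n - 1) 1).map
        (fun i => PySem.List.pyGetD nums (i + 1) 0 - PySem.List.pyGetD nums i 0)
    let m : Int := n - 1
    let L : List Int := (PySem.List.pyRange 1 m 1).foldl
        (fun L i =>
          if PySem.List.pyGetD diff i 0 = PySem.List.pyGetD diff (i - 1) 0 then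
            PySem.List.pySetD L i (PySem.List.pyGetD L (i - 1) 0 + 1)
          else L)
        (List.replicate m.toNat 1)
    let R : List Int := (PySem.List.pyRange (m - 2) (-1) (-1)).foldl
        (fun R i =>
          if PySem.List.pyGetD diff i 0 = PySem.List.pyGetD diff (i + 1) 0 then
            PySem.List.pySetD R i (PySem.List.pyGetD R (i + 1) 0 + 1)
          else R)
        (List.replicate m.toNat 1)
    -- max(L): L is nonempty here (m ≥ 2), so the default of getD is never used
    let maxRun : Int := (PySem.List.max? L (fun x => x)).getD 0
    let ans0 : Int := min n (maxRun + 2)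
    let ans : Int := (PySem.List.pyRange 1 (n - 1) 1).foldl
        (fun ans k =>
          let gap := PySem.List.pyGetD nums (k + 1) 0 - PySem.List.pyGetD nums (k - 1) 0
          if PySem.Int.mod gap 2 ≠ 0 then ans
          else
            let x := PySem.Int.floordiv gap 2
            let left := if 0 ≤ k - 2 then
                (if PySem.List.pyGetD diff (k - 2) 0 = x then PySem.List.pyGetD L (k - 2) 0 else 0)
              else 0
            let right := if k + 1 ≤ m - 1 then
                (if PySem.List.pyGetD diff (k + 1) 0 = x then PySem.List.pyGetD R (k + 1) 0 else 0)
              else 0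
            max ans (left + right + 3))
        ans0
    min ans n

-- ===== PORT B =====
-- while j >= 0 and d[j] == x: left += 1; j -= 1   (called with the Nat image of a j ≥ 0)
def cntL (d : List Int) (x : Int) : Nat → Int
  | 0 => if d.getD 0 0 = x then 1 else 0
  | j + 1 => if d.getD (j + 1) 0 = x then cntL d x j + 1 else 0

-- while j <= n - 2 and d[j] == x: right += 1; j += 1   (n - 2 is the last index of d)
def cntR (d : List Int) (x : Int) (i : Nat) : Int :=
  if _h : i < d.length then
    (if d.getD i 0 = x then cntR d x (i + 1) + 1 else 0)
  else 0
termination_by d.length - i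

def longestArithmetic_alt (nums : List Int) : Int :=
  let n : Int := nums.length
  if n ≤ 2 then n
  else
    -- zip(nums, nums[1:]): the slice nums[1:] is exactly drop 1
    let d : List Int := (nums.zip (nums.drop 1)).map (fun p => p.2 - p.1)
    let rb : Int × Int := (PySem.List.pyRange 1 (n - 1) 1).foldl
        (fun s i =>
          let cur := if PySem.List.pyGetD d i 0 = PySem.List.pyGetD d (i - 1) 0 then s.1 + 1 else 1
          (cur, max s.2 cur))
        (1, 1)
    let best : Int := (PySem.List.pyRange 1 (n - 1) 1).foldl
        (fun best k =>
          let s := PySem.List.pyGetD d (k - 1) 0 + PySem.List.pyGetD d k 0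
          if PySem.Int.mod s 2 = 0 then
            let x := PySem.Int.floordiv s 2
            -- j starts at k - 2 (the loop body runs only for j ≥ 0) and at k + 1 ≥ 0
            let left := if 0 ≤ k - 2 then cntL d x (k - 2).toNat else 0
            let right := cntR d x (k + 1).toNat
            max best (left + right + 3)
          else best)
        (rb.2 + 2)
    min best n

-- ===== PRECONDITION & SPEC =====
def Spec_longestArithmetic (nums : List Int) (out : Int) : Prop := out = longestArithmetic_alt nums
instance (nums : List Int) (out : Int) : Decidable (Spec_longestArithmetic nums out) := by unfold Spec_longestArithmetic; infer_instance

-- ===== CLAIM (what is proved, stated in full; the proofs are below) =====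
def Claim_equal_longestArithmetic : Prop := ∀ (nums : List Int), Dom_longestArithmetic nums → Spec_longestArithmetic nums (longestArithmetic nums)

-- ===== LEMMAS AND PROOFS =====

-- length of the constant-difference run of d ending at index i
def Lrec (d : List Int) : Nat → Int
  | 0 => 1
  | i + 1 => if d.getD (i + 1) 0 = d.getD i 0 then Lrec d i + 1 else 1

-- length of the constant-difference run of d starting at index i
def Rrec (d : List Int) (i : Nat) : Int :=
  if _h : i + 1 < d.length then
    (if d.getD i 0 = d.getD (i + 1) 0 then Rrec d (i + 1) + 1 else 1)
  else 1
termination_by d.length - i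

lemma lrec_pos (d : List Int) (i : Nat) : 1 ≤ Lrec d i := by
  cases i with
  | zero => simp [Lrec]
  | succ i =>
    have := lrec_pos d i
    simp only [Lrec]; split_ifs <;> omega

lemma cntL_nonneg (d : List Int) (x : Int) (i : Nat) : 0 ≤ cntL d x i := by
  cases i with
  | zero => show 0 ≤ if d.getD 0 0 = x then 1 else 0; split_ifs <;> omega
  | succ i =>
    have := cntL_nonneg d x i
    show 0 ≤ if d.getD (i + 1) 0 = x then cntL d x i + 1 else 0
    split_ifs <;> omega

lemma cntR_nonneg (d : List Int) (x : Int) (i : Nat) : 0 ≤ cntR d x i := by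
  rw [cntR]; split_ifs with h1 h2
  · have := cntR_nonneg d x (i + 1); omega
  · omega
  · omega
termination_by d.length - i

lemma cntL_ne (d : List Int) (x : Int) (i : Nat) (h : ¬ d.getD i 0 = x) : cntL d x i = 0 := by
  cases i with
  | zero => show (if d.getD 0 0 = x then (1:Int) else 0) = 0; rw [if_neg h]
  | succ i => show (if d.getD (i + 1) 0 = x then cntL d x i + 1 else 0) = 0; rw [if_neg h]

lemma cntL_eq (d : List Int) (x : Int) (i : Nat) (h : d.getD i 0 = x) :
    cntL d x i = Lrec d i := by
  induction i with
  | zero =>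
    show (if d.getD 0 0 = x then (1:Int) else 0) = 1
    rw [if_pos h]
  | succ i ih =>
    show (if d.getD (i + 1) 0 = x then cntL d x i + 1 else 0)
      = if d.getD (i + 1) 0 = d.getD i 0 then Lrec d i + 1 else 1
    rw [if_pos h]
    by_cases hi : d.getD i 0 = x
    · rw [ih hi, if_pos (by rw [h, hi])]
    · rw [cntL_ne d x i hi, if_neg (fun he => hi (he.symm.trans h)), zero_add]

lemma cntR_ge (d : List Int) (x : Int) (i : Nat) (h : d.length ≤ i) : cntR d x i = 0 := by
  rw [cntR, dif_neg (by omega)]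

lemma cntR_ne (d : List Int) (x : Int) (i : Nat) (hi : i < d.length) (h : ¬ d.getD i 0 = x) :
    cntR d x i = 0 := by
  rw [cntR, dif_pos hi, if_neg h]

lemma cntR_eq (d : List Int) (x : Int) (i : Nat) (hi : i < d.length) (h : d.getD i 0 = x) :
    cntR d x i = Rrec d i := by
  rw [cntR, dif_pos hi, if_pos h, Rrec]
  by_cases h1 : i + 1 < d.length
  · rw [dif_pos h1]
    by_cases h2 : d.getD (i + 1) 0 = x
    · rw [cntR_eq d x (i + 1) h1 h2, if_pos (by rw [h, h2])]
    · rw [cntR_ne d x (i + 1) h1 h2, if_neg (fun he => h2 (he.symm.trans h)), zero_add]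
  · rw [dif_neg h1, cntR_ge d x (i + 1) (by omega), zero_add]
termination_by d.length - i

lemma set_replicate_last (j : Nat) (v : Int) :
    (List.replicate (j + 1) (1 : Int)).set j v = List.replicate j 1 ++ [v] := by
  induction j with
  | zero => simp
  | succ j ih =>
    rw [List.replicate_succ, List.set_cons_succ, ih, List.replicate_succ, List.cons_append]

lemma pyRange_neg_one_append_last (a b : Int) (h : b ≤ a) :
    PySem.List.pyRange a (b - 1) (-1) = PySem.List.pyRange a b (-1) ++ [b] := by
  rw [PySem.List.pyRange_neg_one, PySem.List.pyRange_neg_one]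
  have h2 : (a - (b - 1)).toNat = (a - b).toNat + 1 := by omega
  rw [h2, List.range_succ]
  simp only [List.map_append, List.map_cons, List.map_nil]
  congr 2
  omega

lemma dlen (nums : List Int) :
    ((nums.zip (nums.drop 1)).map (fun p : Int × Int => p.2 - p.1)).length = nums.length - 1 := by
  simp [List.length_zip]

lemma dgetD (nums : List Int) (i : Nat) (h : i + 1 < nums.length) :
    ((nums.zip (nums.drop 1)).map (fun p : Int × Int => p.2 - p.1)).getD i 0
      = nums.getD (i + 1) 0 - nums.getD i 0 := by
  have hlen : i < ((nums.zip (nums.drop 1)).map (fun p : Int × Int => p.2 - p.1)).length := by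
    rw [dlen]; omega
  rw [List.getD_eq_getElem _ _ hlen, List.getD_eq_getElem _ _ (by omega),
    List.getD_eq_getElem _ _ (by omega : i < nums.length)]
  simp [List.getElem_zip]

lemma diff_eq (nums : List Int) :
    (PySem.List.pyRange 0 ((nums.length : Int) - 1) 1).map
        (fun i => PySem.List.pyGetD nums (i + 1) 0 - PySem.List.pyGetD nums i 0)
      = (nums.zip (nums.drop 1)).map (fun p => p.2 - p.1) := by
  apply List.ext_getElem
  · rw [List.length_map, PySem.List.length_pyRange_one, List.length_map, List.length_zip,
      List.length_drop]
    omega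
  · intro i h1 h2
    have hi : i < nums.length - 1 := by
      rw [List.length_map, List.length_zip, List.length_drop] at h2; omega
    rw [List.getElem_map, PySem.List.getElem_pyRange_one, List.getElem_map, List.getElem_zip]
    simp only [List.getElem_drop]
    have e1 : (0 : Int) + (i : Int) + 1 = ((i + 1 : Nat) : Int) := by push_cast; ring
    have e2 : (0 : Int) + (i : Int) = ((i : Nat) : Int) := by omega
    rw [e1, e2, PySem.List.pyGetD_natCast, PySem.List.pyGetD_natCast,
      List.getD_eq_getElem _ _ (by omega), List.getD_eq_getElem _ _ (by omega : i < nums.length)]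
    simp [Nat.add_comm 1 i]

lemma LA_aux (d : List Int) (m : Nat) (hm : d.length = m) (j : Nat) (h1 : 1 ≤ j) (h2 : j ≤ m) :
    (PySem.List.pyRange 1 (j : Int) 1).foldl
      (fun L i => if PySem.List.pyGetD d i 0 = PySem.List.pyGetD d (i - 1) 0 then
          PySem.List.pySetD L i (PySem.List.pyGetD L (i - 1) 0 + 1) else L)
      (List.replicate m 1)
    = (List.range j).map (Lrec d) ++ List.replicate (m - j) 1 := by
  induction j, h1 using Nat.le_induction with
  | base =>
    rw [show ((1 : Nat) : Int) = 1 from rfl, PySem.List.pyRange_one_eq_nil le_rfl, List.foldl_nil]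
    rw [show (List.range 1).map (Lrec d) = [1] from rfl]
    obtain ⟨s, rfl⟩ : ∃ s, m = s + 1 := ⟨m - 1, by omega⟩
    rw [List.replicate_succ, show s + 1 - 1 = s from rfl, List.singleton_append]
  | succ j hj ih =>
    have hjm : j ≤ m := by omega
    rw [show ((j + 1 : Nat) : Int) = (j : Int) + 1 by push_cast; ring,
      PySem.List.pyRange_one_succ_right (by exact_mod_cast hj),
      List.foldl_append, ih hjm, List.foldl_cons, List.foldl_nil]
    obtain ⟨j', rfl⟩ : ∃ j', j = j' + 1 := ⟨j - 1, by omega⟩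
    rw [show ((j' + 1 : Nat) : Int) - 1 = ((j' : Nat) : Int) by push_cast; ring]
    simp only [PySem.List.pyGetD_natCast, PySem.List.pySetD_natCast]
    rw [List.getD_append _ _ _ _ (by simp), PySem.List.getD_map_range _ _ _ _ (by omega : j' < j' + 1)]
    rw [List.set_append_right _ _ (by simp)]
    rw [show j' + 1 - ((List.range (j' + 1)).map (Lrec d)).length = 0 by simp]
    rw [show m - (j' + 1) = (m - (j' + 2)) + 1 by omega, List.replicate_succ, List.set_cons_zero]
    rw [List.range_succ, List.map_append]
    have hLr : Lrec d (j' + 1) = if d.getD (j' + 1) 0 = d.getD j' 0 then Lrec d j' + 1 else 1 := rfl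
    split_ifs with hc
    · have hc' : d[j' + 1]?.getD 0 = d[j']?.getD 0 := by
        simpa [List.getD_eq_getElem?_getD] using hc
      simp [List.range_succ, hLr, hc']
    · have hc' : ¬ d[j' + 1]?.getD 0 = d[j']?.getD 0 := by
        simpa [List.getD_eq_getElem?_getD] using hc
      simp [List.range_succ, hLr, hc']

lemma LA_eq (d : List Int) (m : Nat) (hm : d.length = m) (h1 : 1 ≤ m) :
    (PySem.List.pyRange 1 (m : Int) 1).foldl
      (fun L i => if PySem.List.pyGetD d i 0 = PySem.List.pyGetD d (i - 1) 0 then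
          PySem.List.pySetD L i (PySem.List.pyGetD L (i - 1) 0 + 1) else L)
      (List.replicate m 1)
    = (List.range m).map (Lrec d) := by
  rw [LA_aux d m hm m h1 le_rfl]; simp

lemma RA_aux (d : List Int) (m : Nat) (hm : d.length = m) (h2 : 2 ≤ m) (t : Nat) (ht : t ≤ m - 1) :
    (PySem.List.pyRange ((m : Int) - 2) ((((m - 1 - t : Nat)) : Int) - 1) (-1)).foldl
      (fun R i => if PySem.List.pyGetD d i 0 = PySem.List.pyGetD d (i + 1) 0 then
          PySem.List.pySetD R i (PySem.List.pyGetD R (i + 1) 0 + 1) else R)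
      (List.replicate m 1)
    = List.replicate (m - 1 - t) 1 ++ (List.range (t + 1)).map (fun u => Rrec d (m - 1 - t + u)) := by
  induction t with
  | zero =>
    obtain ⟨s, rfl⟩ : ∃ s, m = s + 2 := ⟨m - 2, by omega⟩
    rw [show ((((s + 2 - 1 - 0 : Nat)) : Int) - 1) = (((s + 2 : Nat) : Int) - 2) by omega,
      PySem.List.pyRange_neg_one_eq_nil le_rfl, List.foldl_nil]
    have hR : Rrec d (s + 1) = 1 := by rw [Rrec, dif_neg (by omega)]
    rw [show s + 2 - 1 - 0 = s + 1 from rfl,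
      show (List.range 1).map (fun u => Rrec d (s + 1 + u)) = [Rrec d (s + 1 + 0)] from rfl,
      show s + 1 + 0 = s + 1 from rfl, hR,
      show s + 2 = (s + 1) + 1 from rfl, List.replicate_succ']
  | succ t ih =>
    have hj : m - 1 - (t + 1) = m - 2 - t := by omega
    rw [show (((m - 1 - (t + 1) : Nat)) : Int) - 1 = ((((m - 1 - t : Nat)) : Int) - 1) - 1 by omega,
      pyRange_neg_one_append_last _ _ (by omega),
      List.foldl_append, ih (by omega), List.foldl_cons, List.foldl_nil,
      show (((m - 1 - t : Nat)) : Int) - 1 = (((m - 2 - t : Nat)) : Int) by omega]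
    set j : Nat := m - 2 - t with hjdef
    have hj1 : m - 1 - t = j + 1 := by omega
    simp only [hj1]
    rw [show ((j : Nat) : Int) + 1 = ((j + 1 : Nat) : Int) by push_cast; ring]
    simp only [PySem.List.pyGetD_natCast, PySem.List.pySetD_natCast]
    rw [List.getD_append_right _ _ _ _ (by simp),
      show j + 1 - (List.replicate (j + 1) (1 : Int)).length = 0 by simp]
    rw [List.range_succ_eq_map, List.map_cons, List.getD_cons_zero]
    rw [List.set_append_left _ _ (by simp), set_replicate_last]
    have hRr : Rrec d j = if d.getD j 0 = d.getD (j + 1) 0 then Rrec d (j + 1) + 1 else 1 := by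
      rw [Rrec, dif_pos (by omega)]
    rw [show m - 1 - (t + 1) = j from hj]
    rw [List.range_succ_eq_map, List.map_cons, List.map_map, List.map_map]
    have hfun : ((fun u => Rrec d (j + u)) ∘ Nat.succ) = fun u => Rrec d (j + 1 + u) := by
      funext u; simp [Function.comp, Nat.add_comm, Nat.add_assoc]
    rw [show j + 0 = j from rfl]
    split_ifs with hc
    · rw [hRr, if_pos hc, hfun]
      simp only [List.append_assoc, List.singleton_append, show j + 1 + 0 = j + 1 from rfl]
      simp
      rw [List.range_succ_eq_map, List.map_cons, List.map_map]
    · rw [hRr, if_neg hc, hfun]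
      simp only [List.append_assoc, List.singleton_append, show j + 1 + 0 = j + 1 from rfl,
        List.replicate_succ']
      simp
      rw [List.range_succ_eq_map, List.map_cons, List.map_map]

lemma RA_eq (d : List Int) (m : Nat) (hm : d.length = m) (h2 : 2 ≤ m) :
    (PySem.List.pyRange ((m : Int) - 2) (-1) (-1)).foldl
      (fun R i => if PySem.List.pyGetD d i 0 = PySem.List.pyGetD d (i + 1) 0 then
          PySem.List.pySetD R i (PySem.List.pyGetD R (i + 1) 0 + 1) else R)
      (List.replicate m 1)
    = (List.range m).map (Rrec d) := by
  have h := RA_aux d m hm h2 (m - 1) le_rfl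
  rw [show ((((m - 1 - (m - 1) : Nat)) : Int) - 1) = (-1 : Int) by simp] at h
  rw [h, show m - 1 - (m - 1) = 0 by omega, show m - 1 + 1 = m by omega]
  simp

lemma maxA_eq (d : List Int) (m : Nat) (h1 : 1 ≤ m) :
    (PySem.List.max? ((List.range m).map (Lrec d)) (fun x => x)).getD 0
      = ((List.range (m - 1)).map (fun u => Lrec d (u + 1))).foldl max 1 := by
  obtain ⟨s, rfl⟩ : ∃ s, m = s + 1 := ⟨m - 1, by omega⟩
  rw [List.range_succ_eq_map, List.map_cons, List.map_map, PySem.List.max?_id_cons,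
    Option.getD_some, show s + 1 - 1 = s from rfl]
  rw [show (Lrec d ∘ Nat.succ) = (fun u => Lrec d (u + 1)) from rfl]
  rfl

lemma rb_aux (d : List Int) (m : Nat) (j : Nat) (h1 : 1 ≤ j) (h2 : j ≤ m) :
    (PySem.List.pyRange 1 (j : Int) 1).foldl
      (fun (s : Int × Int) i =>
        ((if PySem.List.pyGetD d i 0 = PySem.List.pyGetD d (i - 1) 0 then s.1 + 1 else 1),
          max s.2 (if PySem.List.pyGetD d i 0 = PySem.List.pyGetD d (i - 1) 0 then s.1 + 1 else 1)))
      (1, 1)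
    = (Lrec d (j - 1), ((List.range (j - 1)).map (fun u => Lrec d (u + 1))).foldl max 1) := by
  induction j, h1 using Nat.le_induction with
  | base =>
    rw [show ((1 : Nat) : Int) = 1 from rfl, PySem.List.pyRange_one_eq_nil le_rfl, List.foldl_nil]
    rfl
  | succ j hj ih =>
    rw [show ((j + 1 : Nat) : Int) = (j : Int) + 1 by push_cast; ring,
      PySem.List.pyRange_one_succ_right (by exact_mod_cast hj),
      List.foldl_append, ih (by omega), List.foldl_cons, List.foldl_nil]
    obtain ⟨j', rfl⟩ : ∃ j', j = j' + 1 := ⟨j - 1, by omega⟩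
    rw [show ((j' + 1 : Nat) : Int) - 1 = ((j' : Nat) : Int) by push_cast; ring]
    simp only [PySem.List.pyGetD_natCast]
    rw [show j' + 1 - 1 = j' from rfl, show j' + 1 + 1 - 1 = j' + 1 from rfl]
    have hLr : Lrec d (j' + 1) = if d.getD (j' + 1) 0 = d.getD j' 0 then Lrec d j' + 1 else 1 := rfl
    rw [List.range_succ, List.map_append, List.foldl_append,
      show (List.map (fun u => Lrec d (u + 1)) [j']) = [Lrec d (j' + 1)] from rfl,
      List.foldl_cons, List.foldl_nil, ← hLr]

lemma foldl_ite_max (l : List Int) (C : Int → Prop) [DecidablePred C] (v : Int → Int) :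
    (∀ k ∈ l, 0 ≤ v k) → ∀ a : Int, 0 ≤ a →
    l.foldl (fun acc k => if C k then max acc (v k) else acc) a
      = max a (l.foldl (fun acc k => if C k then max acc (v k) else acc) 0) := by
  induction l with
  | nil => intro _ a ha; simp only [List.foldl_nil]; omega
  | cons k l ih =>
    intro hv a ha
    have h0 : (0 : Int) ≤ v k := hv k List.mem_cons_self
    have hv' : ∀ k' ∈ l, 0 ≤ v k' := fun k' hk' => hv k' (List.mem_cons_of_mem _ hk')
    simp only [List.foldl_cons]
    by_cases hC : C k
    · rw [if_pos hC, if_pos hC, ih hv' (max a (v k)) (by omega), ih hv' (max 0 (v k)) (by omega)]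
      omega
    · rw [if_neg hC, if_neg hC, ih hv' a ha]

lemma step_eq (nums d : List Int) (m : Nat)
    (hd : d = (nums.zip (nums.drop 1)).map (fun p : Int × Int => p.2 - p.1))
    (hm : nums.length = m + 1) (k : Int) (hk1 : 1 ≤ k) (hk2 : k < (m : Int)) (ans : Int) :
    (if PySem.Int.mod (PySem.List.pyGetD nums (k + 1) 0 - PySem.List.pyGetD nums (k - 1) 0) 2 ≠ 0 then ans
      else
        max ans
          ((if 0 ≤ k - 2 then
              (if PySem.List.pyGetD d (k - 2) 0
                  = PySem.Int.floordiv (PySem.List.pyGetD nums (k + 1) 0 - PySem.List.pyGetD nums (k - 1) 0) 2 then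
                PySem.List.pyGetD ((List.range m).map (Lrec d)) (k - 2) 0 else 0)
            else 0)
          + (if k + 1 ≤ (m : Int) - 1 then
              (if PySem.List.pyGetD d (k + 1) 0
                  = PySem.Int.floordiv (PySem.List.pyGetD nums (k + 1) 0 - PySem.List.pyGetD nums (k - 1) 0) 2 then
                PySem.List.pyGetD ((List.range m).map (Rrec d)) (k + 1) 0 else 0)
            else 0)
          + 3))
    = (if PySem.Int.mod (PySem.List.pyGetD d (k - 1) 0 + PySem.List.pyGetD d k 0) 2 = 0 then
        max ans
          ((if 0 ≤ k - 2 then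
              cntL d (PySem.Int.floordiv (PySem.List.pyGetD d (k - 1) 0 + PySem.List.pyGetD d k 0) 2) (k - 2).toNat
            else 0)
          + cntR d (PySem.Int.floordiv (PySem.List.pyGetD d (k - 1) 0 + PySem.List.pyGetD d k 0) 2) (k + 1).toNat
          + 3)
      else ans) := by
  obtain ⟨kN, rfl⟩ : ∃ kN : Nat, k = (kN : Int) := ⟨k.toNat, by omega⟩
  have hk1' : 1 ≤ kN := by omega
  have hk2' : kN < m := by omega
  have hdlen : d.length = m := by rw [hd, dlen, hm]; omega
  rw [show ((kN : Nat) : Int) + 1 = ((kN + 1 : Nat) : Int) by push_cast; ring,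
    show ((kN : Nat) : Int) - 1 = ((kN - 1 : Nat) : Int) by omega]
  simp only [PySem.List.pyGetD_natCast, Int.toNat_natCast]
  have hgap : nums.getD (kN + 1) 0 - nums.getD (kN - 1) 0 = d.getD (kN - 1) 0 + d.getD kN 0 := by
    rw [hd, dgetD nums (kN - 1) (by omega), dgetD nums kN (by omega),
      show kN - 1 + 1 = kN by omega]
    ring
  rw [hgap]
  by_cases hmod : PySem.Int.mod (d.getD (kN - 1) 0 + d.getD kN 0) 2 = 0
  · rw [if_neg (by simpa using hmod), if_pos hmod]
    congr 1
    congr 1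
    congr 1
    · -- left parts
      by_cases hk2c : (0 : Int) ≤ (kN : Int) - 2
      · rw [if_pos hk2c, if_pos hk2c,
          show ((kN : Nat) : Int) - 2 = ((kN - 2 : Nat) : Int) by omega]
        simp only [PySem.List.pyGetD_natCast, Int.toNat_natCast]
        rw [PySem.List.getD_map_range _ _ _ _ (by omega : kN - 2 < m)]
        by_cases hLx : d.getD (kN - 2) 0
            = PySem.Int.floordiv (d.getD (kN - 1) 0 + d.getD kN 0) 2
        · rw [if_pos hLx, cntL_eq d _ _ hLx]
        · rw [if_neg hLx, cntL_ne d _ _ hLx]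
      · rw [if_neg hk2c, if_neg hk2c]
    · -- right parts
      by_cases hkm : ((kN + 1 : Nat) : Int) ≤ (m : Int) - 1
      · have hkm' : kN + 1 < m := by omega
        rw [if_pos hkm, PySem.List.getD_map_range _ _ _ _ hkm']
        by_cases hRx : d.getD (kN + 1) 0
            = PySem.Int.floordiv (d.getD (kN - 1) 0 + d.getD kN 0) 2
        · rw [if_pos hRx, cntR_eq d _ _ (by omega) hRx]
        · rw [if_neg hRx, cntR_ne d _ _ (by omega) hRx]
      · rw [if_neg hkm, cntR_ge d _ _ (by omega)]
  · rw [if_pos (by simpa using hmod), if_neg hmod]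

lemma bridge_eq (nums d : List Int) (m : Nat)
    (hd : d = (nums.zip (nums.drop 1)).map (fun p : Int × Int => p.2 - p.1))
    (hm : nums.length = m + 1) (a : Int) :
    (PySem.List.pyRange 1 (m : Int) 1).foldl
      (fun ans k =>
        if PySem.Int.mod (PySem.List.pyGetD nums (k + 1) 0 - PySem.List.pyGetD nums (k - 1) 0) 2 ≠ 0 then ans
        else
          max ans
            ((if 0 ≤ k - 2 then
                (if PySem.List.pyGetD d (k - 2) 0
                    = PySem.Int.floordiv (PySem.List.pyGetD nums (k + 1) 0 - PySem.List.pyGetD nums (k - 1) 0) 2 then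
                  PySem.List.pyGetD ((List.range m).map (Lrec d)) (k - 2) 0 else 0)
              else 0)
            + (if k + 1 ≤ (m : Int) - 1 then
                (if PySem.List.pyGetD d (k + 1) 0
                    = PySem.Int.floordiv (PySem.List.pyGetD nums (k + 1) 0 - PySem.List.pyGetD nums (k - 1) 0) 2 then
                  PySem.List.pyGetD ((List.range m).map (Rrec d)) (k + 1) 0 else 0)
              else 0)
            + 3)) a
    = (PySem.List.pyRange 1 (m : Int) 1).foldl
      (fun best k =>
        if PySem.Int.mod (PySem.List.pyGetD d (k - 1) 0 + PySem.List.pyGetD d k 0) 2 = 0 then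
          max best
            ((if 0 ≤ k - 2 then
                cntL d (PySem.Int.floordiv (PySem.List.pyGetD d (k - 1) 0 + PySem.List.pyGetD d k 0) 2) (k - 2).toNat
              else 0)
            + cntR d (PySem.Int.floordiv (PySem.List.pyGetD d (k - 1) 0 + PySem.List.pyGetD d k 0) 2) (k + 1).toNat
            + 3)
        else best) a := by
  apply PySem.List.foldl_congr_mem
  intro acc k hk
  obtain ⟨h1, h2⟩ := PySem.List.mem_pyRange_one.mp hk
  exact step_eq nums d m hd hm k h1 h2 acc

-- ===== VERDICT (by name: the statement is the Claim_ definition above) =====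
theorem longestArithmetic_spec : Claim_equal_longestArithmetic := by
  unfold Claim_equal_longestArithmetic
  intro nums _
  unfold Spec_longestArithmetic
  by_cases hn : ((nums.length : Int)) ≤ 2
  · simp only [longestArithmetic, longestArithmetic_alt, if_pos hn]
  · have h3 : 3 ≤ nums.length := by omega
    simp only [longestArithmetic, longestArithmetic_alt, if_neg hn]
    rw [diff_eq nums]
    have hdlen : ((nums.zip (nums.drop 1)).map (fun p : Int × Int => p.2 - p.1)).length
        = nums.length - 1 := dlen nums
    rw [show ((nums.length : Int) - 1) = ((nums.length - 1 : Nat) : Int) by omega]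
    simp only [Int.toNat_natCast]
    rw [LA_eq _ (nums.length - 1) hdlen (by omega)]
    rw [RA_eq _ (nums.length - 1) hdlen (by omega)]
    rw [maxA_eq _ (nums.length - 1) (by omega)]
    rw [rb_aux _ (nums.length - 1) (nums.length - 1) (by omega) le_rfl]
    have hsnd : ∀ x y : Int, (Prod.mk x y).2 = y := fun _ _ => rfl
    rw [hsnd]
    rw [bridge_eq nums _ (nums.length - 1) rfl (by omega)]
    set d : List Int := (nums.zip (nums.drop 1)).map (fun p : Int × Int => p.2 - p.1) with hddef
    set m : Nat := nums.length - 1 with hmdef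
    set M : Int := ((List.range (m - 1)).map (fun u => Lrec d (u + 1))).foldl max 1 with hMdef
    have hM : 1 ≤ M := by
      rw [hMdef]; exact (PySem.List.le_foldl_max _ 1).1
    have hv : ∀ k ∈ PySem.List.pyRange 1 (m : Int) 1,
        0 ≤ ((if 0 ≤ k - 2 then
                cntL d (PySem.Int.floordiv (PySem.List.pyGetD d (k - 1) 0 + PySem.List.pyGetD d k 0) 2) (k - 2).toNat
              else 0)
            + cntR d (PySem.Int.floordiv (PySem.List.pyGetD d (k - 1) 0 + PySem.List.pyGetD d k 0) 2) (k + 1).toNat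
            + 3) := by
      intro k _
      have h1 := cntR_nonneg d (PySem.Int.floordiv (PySem.List.pyGetD d (k - 1) 0 + PySem.List.pyGetD d k 0) 2) (k + 1).toNat
      by_cases hc : (0 : Int) ≤ k - 2
      · have h2 := cntL_nonneg d (PySem.Int.floordiv (PySem.List.pyGetD d (k - 1) 0 + PySem.List.pyGetD d k 0) 2) (k - 2).toNat
        rw [if_pos hc]; omega
      · rw [if_neg hc]; omega
    rw [foldl_ite_max (PySem.List.pyRange 1 (m : Int) 1)
        (fun k => PySem.Int.mod (PySem.List.pyGetD d (k - 1) 0 + PySem.List.pyGetD d k 0) 2 = 0)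
        (fun k => ((if 0 ≤ k - 2 then
                cntL d (PySem.Int.floordiv (PySem.List.pyGetD d (k - 1) 0 + PySem.List.pyGetD d k 0) 2) (k - 2).toNat
              else 0)
            + cntR d (PySem.Int.floordiv (PySem.List.pyGetD d (k - 1) 0 + PySem.List.pyGetD d k 0) 2) (k + 1).toNat
            + 3))
        hv (min (nums.length : Int) (M + 2)) (by omega)]
    rw [foldl_ite_max (PySem.List.pyRange 1 (m : Int) 1)
        (fun k => PySem.Int.mod (PySem.List.pyGetD d (k - 1) 0 + PySem.List.pyGetD d k 0) 2 = 0)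
        (fun k => ((if 0 ≤ k - 2 then
                cntL d (PySem.Int.floordiv (PySem.List.pyGetD d (k - 1) 0 + PySem.List.pyGetD d k 0) 2) (k - 2).toNat
              else 0)
            + cntR d (PySem.Int.floordiv (PySem.List.pyGetD d (k - 1) 0 + PySem.List.pyGetD d k 0) 2) (k + 1).toNat
            + 3))
        hv (M + 2) (by omega)]
    omega
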